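-- pv_equiv track=rewrite | github.com/jiangshanmeta/lintcode | src/3480/solution.py | is_complete_array
-- ===== SOURCE A (Python) =====
-- from typing import (
--     List,
-- )
--
-- def is_complete_array(arr: List[int]) -> bool:
--     N = len(arr)
--     s = [False]*(N+1)
--
--     for i in range(len(arr)):
--         if arr[i]>N or arr[i]<1 :
--             return False
--         if s[arr[i]]:
--             return False
--         s[arr[i]] = True
--
--     return True
-- ===== SOURCE B (Python) =====
-- from typing import (
--     List,
-- )
--
-- def is_complete_array(arr: List[int]) -> bool:
--     return sorted(arr) == list(range(1, len(arr) + 1))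
-- ===== Notes on version B (the rewrite author's own statement) =====
-- stated objective: simpler
-- what changed: Replaced the scanning loop that maintains a boolean presence table with early returns by a single sort-then-compare against list(range(1, len(arr)+1)).
import Mathlib
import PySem

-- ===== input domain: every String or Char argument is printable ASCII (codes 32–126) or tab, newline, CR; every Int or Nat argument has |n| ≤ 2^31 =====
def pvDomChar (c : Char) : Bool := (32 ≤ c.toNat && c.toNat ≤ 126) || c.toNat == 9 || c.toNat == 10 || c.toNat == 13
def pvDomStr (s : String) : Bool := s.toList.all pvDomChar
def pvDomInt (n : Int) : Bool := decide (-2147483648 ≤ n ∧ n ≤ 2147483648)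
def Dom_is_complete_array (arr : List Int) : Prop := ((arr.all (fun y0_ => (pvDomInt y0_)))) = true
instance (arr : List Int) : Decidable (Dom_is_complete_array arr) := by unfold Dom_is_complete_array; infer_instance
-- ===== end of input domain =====

-- B replaces A's presence-table scan with sort-then-compare against range(1, len+1): simpler.

-- ===== PORT A =====
-- The Python loop over range(len(arr)) reads arr[i] only; ported as structural
-- recursion over arr carrying the table s.  Inside the else-branch 1 <= a <= N holds,
-- so 's[arr[i]]' is in range: pyGet?/getD and a.toNat are exact there.
def pvLoopA (N : Int) (s : List Bool) : List Int → Bool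
  | [] => true
  | a :: rest =>
    if a > N || a < 1 then false
    else if (PySem.List.pyGet? s a).getD false then false
    else pvLoopA N (s.set a.toNat true) rest

def is_complete_array (arr : List Int) : Bool :=
  pvLoopA (arr.length : Int) (List.replicate (arr.length + 1) false) arr

-- ===== PORT B =====
def is_complete_array_alt (arr : List Int) : Bool :=
  decide (PySem.List.sorted arr id false = PySem.List.pyRange 1 ((arr.length : Int) + 1) 1)

-- ===== PRECONDITION & SPEC =====
def Spec_is_complete_array (arr : List Int) (out : Bool) : Prop := out = is_complete_array_alt arr
instance (arr : List Int) (out : Bool) : Decidable (Spec_is_complete_array arr out) := by unfold Spec_is_complete_array; infer_instance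

-- ===== CLAIM (what is proved, stated in full; the proofs are below) =====
def Claim_equal_is_complete_array : Prop := ∀ (arr : List Int), Dom_is_complete_array arr → Spec_is_complete_array arr (is_complete_array arr)

-- ===== LEMMAS AND PROOFS =====

-- Loop invariant: if s is exactly the presence table of `seen`, the loop accepts
-- `rest` iff every element is in [1,N], rest has no duplicates, and avoids `seen`.
theorem pvLoopA_true_iff (N : Int) :
    ∀ (rest : List Int) (s : List Bool) (seen : List Int),
      s.length = (N + 1).toNat →
      (∀ (k : Nat) (h : k < s.length), s[k] = decide ((k : Int) ∈ seen)) →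
      (pvLoopA N s rest = true ↔
        ((∀ x ∈ rest, 1 ≤ x ∧ x ≤ N) ∧ rest.Nodup ∧ ∀ x ∈ rest, x ∉ seen)) := by
  intro rest
  induction rest with
  | nil => intro s seen _ _; simp [pvLoopA]
  | cons a rest ih =>
    intro s seen hlen hinv
    by_cases hb : a > N ∨ a < 1
    · have : (a > N || a < 1) = true := by
        rcases hb with hb | hb <;> simp [hb]
      simp only [pvLoopA, this, if_true]
      constructor
      · intro h; exact absurd h (by simp)
      · rintro ⟨hbd, -, -⟩
        have := hbd a (by simp)
        omega
    · have h1 : a ≤ N := by omega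
      have h2 : 1 ≤ a := by omega
      have hcond : (a > N || a < 1) = false := by simp; omega
      have h0a : (0 : Int) ≤ a := by omega
      have hlt : a.toNat < s.length := by omega
      have hget : PySem.List.pyGet? s a = some s[a.toNat] := by
        rw [PySem.List.pyGet?_of_nonneg s h0a]
        exact List.getElem?_eq_getElem hlt
      have hcast : ((a.toNat : Int)) = a := Int.toNat_of_nonneg h0a
      have hsa : s[a.toNat] = decide (a ∈ seen) := by
        have := hinv a.toNat hlt; rwa [hcast] at this
      simp only [pvLoopA, hcond, Bool.false_eq_true, if_false, hget, Option.getD_some, hsa]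
      by_cases hmem : a ∈ seen
      · simp only [hmem, decide_true, if_true]
        constructor
        · intro h; exact absurd h (by simp)
        · rintro ⟨-, -, hav⟩
          exact absurd hmem (hav a (by simp))
      · simp only [hmem, decide_false, Bool.false_eq_true, if_false]
        rw [ih (s.set a.toNat true) (a :: seen) (by simpa using hlen) ?_]
        · constructor
          · rintro ⟨hbd, hnd, hav⟩
            refine ⟨?_, ?_, ?_⟩
            · intro x hx
              rcases List.mem_cons.1 hx with rfl | hx
              · exact ⟨h2, h1⟩
              · exact hbd x hx
            · refine List.nodup_cons.2 ⟨?_, hnd⟩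
              intro har
              have := hav a har
              simp at this
            · intro x hx
              rcases List.mem_cons.1 hx with rfl | hx
              · exact hmem
              · intro hxs
                exact hav x hx (List.mem_cons.2 (Or.inr hxs))
          · rintro ⟨hbd, hnd, hav⟩
            obtain ⟨hanr, hnd'⟩ := List.nodup_cons.1 hnd
            refine ⟨fun x hx => hbd x (List.mem_cons.2 (Or.inr hx)), hnd', ?_⟩
            intro x hx hxs
            rcases List.mem_cons.1 hxs with rfl | hxs
            · exact hanr hx
            · exact hav x (List.mem_cons.2 (Or.inr hx)) hxs
        · intro k hk
          by_cases hka : k = a.toNat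
          · subst hka
            simp [List.getElem_set_self, hcast]
          · have hk' : k < s.length := by simpa using hk
            rw [List.getElem_set_ne (by omega)]
            have := hinv k hk'
            rw [this]
            have hne : (k : Int) ≠ a := by
              intro h; apply hka; omega
            simp [hne]

-- A accepts iff arr's elements are exactly bounds-in-[1,N] and distinct.
theorem is_complete_array_true_iff (arr : List Int) :
    is_complete_array arr = true ↔
      ((∀ x ∈ arr, 1 ≤ x ∧ x ≤ (arr.length : Int)) ∧ arr.Nodup) := by
  unfold is_complete_array
  rw [pvLoopA_true_iff (arr.length : Int) arr
      (List.replicate (arr.length + 1) false) []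
      (by simp)
      (by intro k hk; simp)]
  simp

-- B accepts iff arr is a permutation of range(1, N+1).
theorem is_complete_array_alt_true_iff (arr : List Int) :
    is_complete_array_alt arr = true ↔
      arr.Perm (PySem.List.pyRange 1 ((arr.length : Int) + 1) 1) := by
  unfold is_complete_array_alt
  rw [decide_eq_true_iff]
  constructor
  · intro h
    have hperm : (PySem.List.sorted arr id false).Perm arr := PySem.List.sorted_perm ..
    rw [h] at hperm
    exact hperm.symm
  · intro h
    exact PySem.List.sorted_eq_of_perm_of_pairwise_lt arr _ id h.symm
      (PySem.List.pairwise_lt_pyRange_one ..)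

-- The two characterisations coincide (pigeonhole for the forward direction).
theorem pv_char_iff (arr : List Int) :
    ((∀ x ∈ arr, 1 ≤ x ∧ x ≤ (arr.length : Int)) ∧ arr.Nodup) ↔
      arr.Perm (PySem.List.pyRange 1 ((arr.length : Int) + 1) 1) := by
  constructor
  · rintro ⟨hbd, hnd⟩
    have hsub : arr ⊆ PySem.List.pyRange 1 ((arr.length : Int) + 1) 1 := by
      intro x hx
      have := hbd x hx
      rw [PySem.List.mem_pyRange_one]
      omega
    have hsp := hnd.subperm hsub
    refine hsp.perm_of_length_le ?_
    rw [PySem.List.length_pyRange_one]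
    omega
  · intro h
    constructor
    · intro x hx
      have := (h.mem_iff).1 hx
      rw [PySem.List.mem_pyRange_one] at this
      omega
    · exact h.symm.nodup (PySem.List.nodup_pyRange_one ..)

-- ===== VERDICT (by name: the statement is the Claim_ definition above) =====
theorem is_complete_array_spec : Claim_equal_is_complete_array := by
  intro arr _
  unfold Spec_is_complete_array
  have hA := is_complete_array_true_iff arr
  have hB := is_complete_array_alt_true_iff arr
  have hC := pv_char_iff arr
  cases hA' : is_complete_array arr
  · cases hB' : is_complete_array_alt arr
    · rfl
    · exact absurd (hA.2 (hC.2 (hB.1 hB'))) (by simp [hA'])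
  · exact (hB.2 (hC.1 (hA.1 hA'))).symm
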